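-- pv_equiv track=rewrite | github.com/chuanriceeeeee/Python | experiment4/_13_.py | isLoopPrime
-- ===== SOURCE A (Python) =====
-- def isPrime(num:int)->bool:
--     if len([x for x in range(2,num) if (num)%x==0])==0:
--         return True
--     else:
--         return False
--
-- def isLoopPrime(num):
--     if isPrime(num):
--         length=len(str(num))
--         list_num=[]
--         for _ in range(length-1):
--             num=num//10+(num%10)*(10**(length-1))
--             list_num.append(num)
-- # num have already been examinated
--         if len([x for x in list_num if isPrime(x)==False])==0:
--             return True
--     return False
-- ===== SOURCE B (Python) =====
-- def _is_prime(n: int) -> bool: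
--     # same edge semantics as the original helper: every n < 2 counts as prime
--     if n < 2:
--         return True
--     d = 2
--     while d * d <= n:
--         if n % d == 0:
--             return False
--         d += 1
--     return True
--
-- def isLoopPrime(num):
--     if not _is_prime(num):
--         return False
--     length = len(str(num))
--     r = num
--     for _ in range(length - 1):
--         r = r // 10 + (r % 10) * 10 ** (length - 1)
--         if not _is_prime(r):
--             return False
--     return True
-- ===== Notes on version B (the rewrite author's own statement) =====
-- stated objective: faster
-- what changed: Primality is tested by trial division up to sqrt(n) with early exit instead of filtering the whole range(2,n), and rotations are checked inline as they are generated (early return) instead of building a list and filtering it.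
import Mathlib
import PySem

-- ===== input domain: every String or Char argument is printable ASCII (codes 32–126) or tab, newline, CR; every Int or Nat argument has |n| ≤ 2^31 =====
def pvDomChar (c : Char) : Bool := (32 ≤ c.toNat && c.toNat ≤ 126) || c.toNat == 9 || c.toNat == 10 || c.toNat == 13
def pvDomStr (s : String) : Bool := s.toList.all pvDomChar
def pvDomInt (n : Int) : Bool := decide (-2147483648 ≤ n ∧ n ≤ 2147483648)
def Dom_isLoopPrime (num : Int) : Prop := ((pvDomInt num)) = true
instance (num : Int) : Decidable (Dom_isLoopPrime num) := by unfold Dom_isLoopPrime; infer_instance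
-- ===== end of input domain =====

-- B replaces A's O(n)-per-number primality scan (filtering all of range(2,n)) by trial
-- division up to √n with early exit, and checks rotations as it generates them instead of
-- building a list and filtering it; same return value on every int (objective: faster).

-- ===== PORT A =====
-- len([x for x in range(2,num) if num % x == 0]) == 0
def pvIsPrimeA (num : Int) : Bool :=
  if ((PySem.List.pyRange 2 num 1).filter (fun x => PySem.Int.mod num x == 0)).length == 0
  then true else false

def isLoopPrime (num : Int) : Bool :=
  if pvIsPrimeA num then
    -- length = len(str(num)); 10 ** (length - 1): length ≥ 1 always, so .toNat is exact
    let length : Int := ((PySem.Int.toChars num).length : Int)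
    let st :=
      (PySem.List.pyRange 0 (length - 1) 1).foldl
        (fun (s : Int × List Int) _ =>
          let n' := PySem.Int.floordiv s.1 10 + PySem.Int.mod s.1 10 * 10 ^ (length - 1).toNat
          (n', s.2 ++ [n']))
        (num, [])
    if (st.2.filter (fun x => pvIsPrimeA x == false)).length == 0 then true else false
  else false

-- ===== PORT B =====
-- while d * d <= n: if n % d == 0: return False; d += 1
def pvTrial (n d : Int) : Bool :=
  if h : d * d ≤ n then
    if PySem.Int.mod n d == 0 then false else pvTrial n (d + 1)
  else true
termination_by (n + 1 - d).toNat
decreasing_by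
  have hd : d ≤ n := by
    by_cases h0 : d ≤ 0
    · nlinarith [mul_self_nonneg d]
    · nlinarith [mul_self_nonneg d]
  omega

def pvIsPrimeB (n : Int) : Bool :=
  if n < 2 then true else pvTrial n 2

-- the rotation loop with inline check and early exit (k = number of remaining rotations)
def pvLoopB (r : Int) (length : Int) : Nat → Bool
  | 0 => true
  | Nat.succ k =>
    let r' := PySem.Int.floordiv r 10 + PySem.Int.mod r 10 * 10 ^ (length - 1).toNat
    if !(pvIsPrimeB r') then false else pvLoopB r' length k

def isLoopPrime_alt (num : Int) : Bool :=
  if !(pvIsPrimeB num) then false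
  else
    let length : Int := ((PySem.Int.toChars num).length : Int)
    pvLoopB num length (length - 1).toNat

-- ===== PRECONDITION & SPEC =====
def Spec_isLoopPrime (num : Int) (out : Bool) : Prop := out = isLoopPrime_alt num
instance (num : Int) (out : Bool) : Decidable (Spec_isLoopPrime num out) := by unfold Spec_isLoopPrime; infer_instance

-- ===== CLAIM (what is proved, stated in full; the proofs are below) =====
def Claim_equal_isLoopPrime : Prop := ∀ (num : Int), Dom_isLoopPrime num → Spec_isLoopPrime num (isLoopPrime num)

-- ===== LEMMAS AND PROOFS =====

theorem pvTrial_spec (n d : Int) (hd : 2 ≤ d) :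
    pvTrial n d = true ↔ ∀ e : Int, d ≤ e → e * e ≤ n → ¬ e ∣ n := by
  rw [pvTrial]
  by_cases h : d * d ≤ n
  · rw [dif_pos h]
    by_cases hm : (PySem.Int.mod n d == 0) = true
    · rw [if_pos hm]
      constructor
      · intro hf; exact absurd hf Bool.false_ne_true
      · intro hall
        exact ((hall d le_rfl h) ((PySem.Int.mod_eq_zero_iff_dvd n d).mp
          (by simpa using hm))).elim
    · rw [if_neg hm]
      rw [pvTrial_spec n (d + 1) (by omega)]
      constructor
      · intro hall e he hee
        rcases eq_or_lt_of_le he with heq | hlt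
        · subst heq
          intro hdvd
          exact hm (by simp [(PySem.Int.mod_eq_zero_iff_dvd n d).mpr hdvd])
        · exact hall e (by omega) hee
      · intro hall e he hee
        exact hall e (by omega) hee
  · rw [dif_neg h]
    simp only [true_iff]
    intro e he hee hdvd
    have : d * d ≤ e * e := by nlinarith
    omega
termination_by (n + 1 - d).toNat
decreasing_by
  have hdn : d ≤ n := by nlinarith
  omega

theorem pvIsPrimeA_iff (n : Int) :
    pvIsPrimeA n = true ↔ ∀ x : Int, 2 ≤ x → x < n → ¬ x ∣ n := by
  unfold pvIsPrimeA
  split_ifs with hc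
  · simp only [true_iff]
    simp only [beq_iff_eq, List.length_eq_zero_iff, List.filter_eq_nil_iff,
      PySem.List.mem_pyRange_one] at hc
    intro x h2 hlt hdvd
    exact hc x ⟨h2, hlt⟩ ((PySem.Int.mod_eq_zero_iff_dvd n x).mpr hdvd)
  · simp only [false_iff]
    intro hall
    apply hc
    simp only [beq_iff_eq, List.length_eq_zero_iff, List.filter_eq_nil_iff,
      PySem.List.mem_pyRange_one]
    intro x hx hm
    exact hall x hx.1 hx.2 ((PySem.Int.mod_eq_zero_iff_dvd n x).mp hm)

theorem pvPrime_eq (n : Int) : pvIsPrimeA n = pvIsPrimeB n := by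
  rcases lt_or_ge n 2 with h | h
  · simp [pvIsPrimeA, pvIsPrimeB, h, PySem.List.pyRange_one_eq_nil (by omega : n ≤ (2 : Int))]
  · rw [Bool.eq_iff_iff, pvIsPrimeA_iff]
    unfold pvIsPrimeB
    rw [if_neg (by omega), pvTrial_spec n 2 le_rfl]
    constructor
    · intro hall e h2 hee
      exact hall e h2 (by nlinarith)
    · intro hall x h2 hlt hdvd
      obtain ⟨c, hc⟩ := hdvd
      have hx : 0 < x := by omega
      have hcpos : 0 < c := by nlinarith
      have hc2 : 2 ≤ c := by
        rcases (by omega : c = 1 ∨ 2 ≤ c) with hc1 | hc1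
        · exfalso; rw [hc1, mul_one] at hc; omega
        · exact hc1
      by_cases hxx : x * x ≤ n
      · exact hall x h2 hxx ⟨c, hc⟩
      · have hcx : c < x := by nlinarith
        have hcc : c * c ≤ n := by nlinarith
        exact hall c hc2 hcc ⟨x, by rw [hc]; ring⟩

theorem pvPrime_funext : pvIsPrimeA = pvIsPrimeB := funext pvPrime_eq

def pvRotNext (L r : Int) : Int :=
  PySem.Int.floordiv r 10 + PySem.Int.mod r 10 * 10 ^ (L - 1).toNat

def pvRotList (L r : Int) : Nat → List Int
  | 0 => []
  | Nat.succ k => pvRotNext L r :: pvRotList L (pvRotNext L r) k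

theorem pvFoldA (L : Int) (l : List Int) (r : Int) (acc : List Int) :
    (l.foldl
      (fun (s : Int × List Int) _ =>
        let n' := PySem.Int.floordiv s.1 10 + PySem.Int.mod s.1 10 * 10 ^ (L - 1).toNat
        (n', s.2 ++ [n'])) (r, acc)).2 = acc ++ pvRotList L r l.length := by
  induction l generalizing r acc with
  | nil => simp [pvRotList]
  | cons x t ih =>
    simp only [List.foldl_cons, List.length_cons, pvRotList, ih]
    simp [pvRotNext]

theorem pvLoopB_eq (L : Int) (k : Nat) (r : Int) :
    pvLoopB r L k = (pvRotList L r k).all pvIsPrimeB := by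
  induction k generalizing r with
  | zero => simp [pvLoopB, pvRotList]
  | succ k ih =>
    simp only [pvLoopB, pvRotList, List.all_cons, ih, pvRotNext]
    cases pvIsPrimeB (PySem.Int.floordiv r 10 + PySem.Int.mod r 10 * 10 ^ (L - 1).toNat) <;> simp

theorem pvFilterAll (l : List Int) :
    ((if (l.filter (fun x => pvIsPrimeB x == false)).length == 0 then true else false) : Bool)
      = l.all pvIsPrimeB := by
  rw [Bool.eq_iff_iff]
  split_ifs with hc
  · simp only [true_iff, List.all_eq_true]
    simp only [beq_iff_eq, List.length_eq_zero_iff, List.filter_eq_nil_iff] at hc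
    intro x hx
    have := hc x hx
    cases hb : pvIsPrimeB x
    · exact absurd (by simp [hb]) this
    · rfl
  · simp only [false_iff, List.all_eq_true]
    intro h
    apply hc
    simp only [beq_iff_eq, List.length_eq_zero_iff, List.filter_eq_nil_iff]
    intro x hx
    simp [h x hx]

-- ===== VERDICT (by name: the statement is the Claim_ definition above) =====
theorem isLoopPrime_spec : Claim_equal_isLoopPrime := by
  intro num _
  unfold Spec_isLoopPrime isLoopPrime isLoopPrime_alt
  rw [pvPrime_funext]
  cases hp : pvIsPrimeB num
  · simp
  · simp only [Bool.not_true, Bool.false_eq_true, if_false, if_true]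
    rw [pvFoldA ((PySem.Int.toChars num).length : Int), pvFilterAll, List.nil_append,
      PySem.List.length_pyRange_one, pvLoopB_eq]
    norm_num
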